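-- pv_equiv track=rewrite | github.com/AstredStar/Miscelanous-and-practices | 2021_first_excercises/A2-farkle/coins.py | is_base202
-- ===== SOURCE A (Python) =====
-- BASE202_CHARS='0C2OMPIN'
--
-- def is_base202(s):
--     '''
--     (str)->bool
--     checks if a str is a valid base202 number
--     >>> is_base202('20')
--     False
--     >>> is_base202('0c00000000')
--     True
--     >>> is_base202('0c00000c0')
--     False
--     '''
--     s=s.upper()
--     if s[:2]!='0C' or len(s)!=10:
--         return False
--     for i in s:
--         if i not in BASE202_CHARS:
--             return False
--     return True
-- ===== SOURCE B (Python) =====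
-- BASE202_CHARS='0C2OMPIN'
--
-- def is_base202(s):
--     t = s.upper()
--     # declarative positional pattern: each slot lists its allowed characters
--     pattern = ['0', 'C'] + [BASE202_CHARS] * 8
--     def match(p, u):
--         if not p:
--             return not u
--         return bool(u) and u[0] in p[0] and match(p[1:], u[1:])
--     return match(pattern, t)
-- ===== Notes on version B (the rewrite author's own statement) =====
-- stated objective: alternative
-- what changed: A's staged prefix-slice/length checks plus a character loop are replaced by a data-driven pattern matcher: a declarative list of 10 per-position allowed-character sets (['0','C'] + 8 alphabet slots) is consumed recursively in lockstep with the string, so the prefix, length and alphabet constraints all fall out of one recursive match with no explicit length or prefix test.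
import Mathlib
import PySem

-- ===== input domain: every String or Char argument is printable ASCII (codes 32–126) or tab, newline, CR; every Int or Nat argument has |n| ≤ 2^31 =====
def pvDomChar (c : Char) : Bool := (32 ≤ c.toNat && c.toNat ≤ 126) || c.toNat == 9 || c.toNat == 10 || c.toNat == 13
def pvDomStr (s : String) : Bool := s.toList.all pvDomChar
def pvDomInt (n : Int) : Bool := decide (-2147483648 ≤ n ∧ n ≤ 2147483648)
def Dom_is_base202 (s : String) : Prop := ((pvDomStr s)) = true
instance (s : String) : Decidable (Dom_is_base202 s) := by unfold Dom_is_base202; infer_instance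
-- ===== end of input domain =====

-- B replaces A's prefix/length checks and character loop by a recursive matcher
-- over a declarative per-position pattern (objective: alternative).

-- ===== PORT A =====
-- A's `for i in s: if i not in BASE202_CHARS: return False` as structural recursion.
def isBase202LoopA : List Char → Bool
  | [] => true
  | i :: rest =>
    if !PySem.Str.isIn (String.ofList [i]) "0C2OMPIN" then false else isBase202LoopA rest

def is_base202 (s : String) : Bool :=
  let t := PySem.Str.upper s
  if PySem.Str.slice t none (some 2) ≠ "0C" ∨ PySem.Str.len t ≠ 10 then false
  else isBase202LoopA t.toList

-- ===== PORT B =====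
-- B's pattern: ['0', 'C'] + [BASE202_CHARS] * 8
def base202Pattern : List String := ["0", "C"] ++ List.replicate 8 "0C2OMPIN"

-- B's recursive `match(p, u)`.
def matchPat : List String → List Char → Bool
  | [], u => u.isEmpty
  | _ :: _, [] => false
  | p :: pr, c :: ur => PySem.Str.isIn (String.ofList [c]) p && matchPat pr ur

def is_base202_alt (s : String) : Bool :=
  matchPat base202Pattern (PySem.Str.upper s).toList

-- ===== PRECONDITION & SPEC =====
def Spec_is_base202 (s : String) (out : Bool) : Prop := out = is_base202_alt s
instance (s : String) (out : Bool) : Decidable (Spec_is_base202 s out) := by unfold Spec_is_base202; infer_instance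

-- ===== CLAIM (what is proved, stated in full; the proofs are below) =====
def Claim_equal_is_base202 : Prop := ∀ (s : String), Dom_is_base202 s → Spec_is_base202 s (is_base202 s)

-- ===== LEMMAS AND PROOFS =====

theorem singleton_infix_iff_mem {a : Char} {l : List Char} : [a] <:+: l ↔ a ∈ l := by
  constructor
  · intro h; exact h.subset (List.mem_singleton_self a)
  · intro h
    obtain ⟨p, q, rfl⟩ := List.append_of_mem h
    exact ⟨p, q, by simp⟩

theorem isIn_singleton (i : Char) (l : List Char) :
    PySem.Chars.isIn [i] l = decide (i ∈ l) := by
  by_cases h : i ∈ l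
  · simp only [h, decide_true]
    exact (PySem.Chars.isIn_iff_infix _ _).mpr (singleton_infix_iff_mem.mpr h)
  · simp only [h, decide_false]
    exact (PySem.Chars.isIn_eq_false_iff _ _).mpr (fun hc => h (singleton_infix_iff_mem.mp hc))

theorem isInS_singleton (i : Char) (p : String) :
    PySem.Str.isIn (String.ofList [i]) p = decide (i ∈ p.toList) := by
  simpa using isIn_singleton i p.toList

theorem string_eq_of_toList {s t : String} (h : s.toList = t.toList) : s = t := by
  simpa using congrArg String.ofList h

theorem loopA_eq_all (l : List Char) :
    isBase202LoopA l = decide (∀ x ∈ l, x ∈ "0C2OMPIN".toList) := by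
  induction l with
  | nil => simp [isBase202LoopA]
  | cons i rest ih =>
    rw [isBase202LoopA, isInS_singleton, ih]
    by_cases h : i ∈ "0C2OMPIN".toList <;> simp [h]

theorem slice2_eq_iff (t : String) :
    PySem.Str.slice t none (some 2) = "0C" ↔ t.toList.take 2 = ['0', 'C'] := by
  constructor
  · intro h
    have h2 := congrArg String.toList h
    simp only [PySem.Str.toList_slice, PySem.Chars.slice_eq_listSlice] at h2
    rw [show (2:Int) = ((2:Nat):Int) from rfl, PySem.List.slice_to_natCast] at h2
    simpa using h2
  · intro h
    apply string_eq_of_toList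
    simp only [PySem.Str.toList_slice, PySem.Chars.slice_eq_listSlice]
    rw [show (2:Int) = ((2:Nat):Int) from rfl, PySem.List.slice_to_natCast]
    simpa using h

theorem A_char (t : String) :
    ((if PySem.Str.slice t none (some 2) ≠ "0C" ∨ PySem.Str.len t ≠ 10 then false
      else isBase202LoopA t.toList) = true)
    ↔ (t.toList.take 2 = ['0', 'C'] ∧ t.toList.length = 10 ∧
        ∀ c ∈ t.toList, c ∈ "0C2OMPIN".toList) := by
  have hlen : PySem.Str.len t = (t.toList.length : Int) := by simp [PySem.Str.len_eq]
  split_ifs with h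
  · simp only [false_iff]
    rintro ⟨h1, h2, -⟩
    rcases h with h | h
    · exact h ((slice2_eq_iff t).mpr h1)
    · apply h; rw [hlen, h2]; norm_num
  · have h1 := of_not_not (not_or.mp h).1
    have h2 := of_not_not (not_or.mp h).2
    rw [loopA_eq_all]
    simp only [decide_eq_true_eq]
    have e1 := (slice2_eq_iff t).mp h1
    have e2 : t.toList.length = 10 := by rw [hlen] at h2; exact_mod_cast h2
    exact ⟨fun hh => ⟨e1, e2, hh⟩, fun ⟨_, _, hh⟩ => hh⟩

theorem matchPat_replicate (p : String) (n : ℕ) (u : List Char) :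
    matchPat (List.replicate n p) u
      = decide (u.length = n ∧ ∀ c ∈ u, c ∈ p.toList) := by
  induction n generalizing u with
  | zero => cases u <;> simp [matchPat]
  | succ n ih =>
    cases u with
    | nil => simp [List.replicate_succ, matchPat]
    | cons c ur =>
      rw [List.replicate_succ, matchPat, ih, isInS_singleton]
      by_cases hc : c ∈ p.toList <;>
        by_cases hl : ur.length = n <;>
          simp [hc, hl]

theorem B_char (l : List Char) :
    (matchPat base202Pattern l = true)
    ↔ (l.take 2 = ['0', 'C'] ∧ l.length = 10 ∧ ∀ c ∈ l, c ∈ "0C2OMPIN".toList) := by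
  rcases l with _ | ⟨a, _ | ⟨b, rest⟩⟩
  · simp [base202Pattern, matchPat]
  · simp [base202Pattern, matchPat]
  · rw [show base202Pattern = "0" :: "C" :: List.replicate 8 "0C2OMPIN" from rfl]
    rw [matchPat, matchPat, matchPat_replicate, isInS_singleton, isInS_singleton]
    simp only [Bool.and_eq_true, decide_eq_true_eq, List.take_succ_cons, List.take_zero,
      List.cons.injEq, List.length_cons, and_true]
    constructor
    · rintro ⟨ha, hb, h8, hall⟩
      have ha' : a = '0' := by simpa using ha
      have hb' : b = 'C' := by simpa using hb
      subst ha'; subst hb'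
      refine ⟨⟨rfl, rfl⟩, by omega, ?_⟩
      intro c hc
      rcases List.mem_cons.mp hc with rfl | hc
      · decide
      rcases List.mem_cons.mp hc with rfl | hc
      · decide
      exact hall c hc
    · rintro ⟨⟨rfl, rfl⟩, hlen, hall⟩
      refine ⟨by decide, by decide, by omega, ?_⟩
      intro c hc
      exact hall c (List.mem_cons_of_mem _ (List.mem_cons_of_mem _ hc))

-- ===== VERDICT (by name: the statement is the Claim_ definition above) =====
theorem is_base202_spec : Claim_equal_is_base202 := by
  intro s _
  unfold Spec_is_base202
  show (if PySem.Str.slice (PySem.Str.upper s) none (some 2) ≠ "0C" ∨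
            PySem.Str.len (PySem.Str.upper s) ≠ 10 then false
        else isBase202LoopA (PySem.Str.upper s).toList)
      = matchPat base202Pattern (PySem.Str.upper s).toList
  rw [Bool.eq_iff_iff, A_char, B_char]
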